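-- pv_equiv track=rewrite | github.com/Leeky1017/LucidSelf | scripts/rule_converter/outputs/jsonl_writer.py | group_rules_by_system_category
-- ===== SOURCE A (Python) =====
-- from typing import Any, Dict, List, Optional
--
-- def group_rules_by_system_category(
--
--     rules: List[Dict],
-- ) -> Dict[str, Dict[str, List[Dict]]]:
--     """
--     将规则按体系和类别分组
--
--     Args:
--         rules: 规则列表
--
--     Returns:
--         {system: {category: [rules]}}
--     """
--     grouped: Dict[str, Dict[str, List[Dict]]] = {}
--
--     for rule in rules:
--         # 从 engine_id 提取体系
--         engine_id = rule.get("engine_id", "unknown_rule_engine")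
--         system = engine_id.replace("_rule_engine", "")
--
--         # 从 category 获取类别
--         category = rule.get("category", "general")
--
--         if system not in grouped:
--             grouped[system] = {}
--         if category not in grouped[system]:
--             grouped[system][category] = []
--
--         grouped[system][category].append(rule)
--
--     return grouped
-- ===== SOURCE B (Python) =====
-- def _rule_key(rule):
--     engine_id = rule.get("engine_id", "unknown_rule_engine")
--     return (engine_id.replace("_rule_engine", ""), rule.get("category", "general"))
--
--
-- def group_rules_by_system_category(rules):
--     keyed = [(_rule_key(rule), rule) for rule in rules]
--     systems = list(dict.fromkeys(s for (s, _c), _r in keyed))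
--     return {
--         s: {
--             c: [r for (k, r) in keyed if k == (s, c)]
--             for c in dict.fromkeys(c2 for (s2, c2), _r2 in keyed if s2 == s)
--         }
--         for s in systems
--     }
-- ===== Notes on version B (the rewrite author's own statement) =====
-- stated objective: alternative
-- what changed: A builds the nested dict incrementally with membership checks and in-place appends inside one loop; B first maps each rule to its (system, category) key, takes the first-occurrence-deduplicated key lists, and builds the nested dict declaratively by filtering the keyed list per group.
import Mathlib
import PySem

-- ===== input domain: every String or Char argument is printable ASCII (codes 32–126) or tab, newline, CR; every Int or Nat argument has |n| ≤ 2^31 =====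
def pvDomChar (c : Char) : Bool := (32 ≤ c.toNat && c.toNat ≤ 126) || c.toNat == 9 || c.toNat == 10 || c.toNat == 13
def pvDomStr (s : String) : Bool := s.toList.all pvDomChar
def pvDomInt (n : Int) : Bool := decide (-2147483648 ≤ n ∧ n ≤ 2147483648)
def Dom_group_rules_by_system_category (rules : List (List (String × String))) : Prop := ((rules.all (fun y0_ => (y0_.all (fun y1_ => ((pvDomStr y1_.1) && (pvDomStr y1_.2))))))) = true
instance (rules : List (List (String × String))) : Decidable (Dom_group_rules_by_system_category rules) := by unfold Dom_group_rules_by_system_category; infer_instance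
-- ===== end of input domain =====

-- B replaces A's incremental nested-dict building with a map-to-keys / dedup / filter-per-group
-- decomposition (objective: alternative; same observable return value, proved equal).


-- ===== PORT A =====
-- literal transliteration: one loop building a nested PySem.Dict, returned as association lists
def group_rules_by_system_category (rules : List (List (String × String))) : List (String × List (String × List (List (String × String)))) :=
  let grouped : PySem.Dict String (PySem.Dict String (List (List (String × String)))) :=
    rules.foldl (fun grouped rule =>
      let engine_id := (PySem.Dict.mk rule).getD "engine_id" "unknown_rule_engine"
      let system := PySem.Str.replace engine_id "_rule_engine" ""
      let category := (PySem.Dict.mk rule).getD "category" "general"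
      let grouped := if grouped.contains system then grouped else grouped.insert system PySem.Dict.empty
      let inner := grouped.getD system PySem.Dict.empty
      let inner := if inner.contains category then inner else inner.insert category []
      grouped.insert system (inner.insert category (inner.getD category [] ++ [rule]))) PySem.Dict.empty
  grouped.items.map (fun p => (p.1, p.2.items))

-- ===== PORT B =====
-- B-side helper: the (system, category) key of a rule
def ruleKey (rule : List (String × String)) : String × String :=
  let engine_id := (PySem.Dict.mk rule).getD "engine_id" "unknown_rule_engine"
  (PySem.Str.replace engine_id "_rule_engine" "", (PySem.Dict.mk rule).getD "category" "general")

-- literal transliteration of Source B: key every rule, dedup key lists, filter per group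
def group_rules_by_system_category_alt (rules : List (List (String × String))) : List (String × List (String × List (List (String × String)))) :=
  let keyed := rules.map (fun rule => (ruleKey rule, rule))
  let systems := PySem.List.dedup (keyed.map (fun p => p.1.1))
  systems.map (fun s =>
    (s, (PySem.List.dedup ((keyed.filter (fun p => p.1.1 == s)).map (fun p => p.1.2))).map
      (fun c => (c, (keyed.filter (fun p => p.1 == (s, c))).map (fun p => p.2)))))

-- ===== PRECONDITION & SPEC =====
def Spec_group_rules_by_system_category (rules : List (List (String × String))) (out : List (String × List (String × List (List (String × String))))) : Prop := out = group_rules_by_system_category_alt rules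
instance (rules : List (List (String × String))) (out : List (String × List (String × List (List (String × String))))) : Decidable (Spec_group_rules_by_system_category rules out) := by
  unfold Spec_group_rules_by_system_category
  have h1 : DecidableEq (List (String × List (List (String × String)))) := inferInstance
  have h2 : DecidableEq (String × List (String × List (List (String × String)))) := inferInstance
  exact List.hasDecEq _ _

-- ===== CLAIM (what is proved, stated in full; the proofs are below) =====
def Claim_equal_group_rules_by_system_category : Prop := ∀ (rules : List (List (String × String))), Dom_group_rules_by_system_category rules → Spec_group_rules_by_system_category rules (group_rules_by_system_category rules)

-- ===== LEMMAS AND PROOFS =====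

-- A's loop body, named for the proofs (definitionally the lambda inside port A)
def stepA (grouped : PySem.Dict String (PySem.Dict String (List (List (String × String)))))
    (rule : List (String × String)) : PySem.Dict String (PySem.Dict String (List (List (String × String)))) :=
  let engine_id := (PySem.Dict.mk rule).getD "engine_id" "unknown_rule_engine"
  let system := PySem.Str.replace engine_id "_rule_engine" ""
  let category := (PySem.Dict.mk rule).getD "category" "general"
  let grouped := if grouped.contains system then grouped else grouped.insert system PySem.Dict.empty
  let inner := grouped.getD system PySem.Dict.empty
  let inner := if inner.contains category then inner else inner.insert category []
  grouped.insert system (inner.insert category (inner.getD category [] ++ [rule]))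

def sysList (l : List (List (String × String))) : List String := l.map (fun r => (ruleKey r).1)

def catList (s : String) (l : List (List (String × String))) : List String :=
  (l.filter (fun r => (ruleKey r).1 == s)).map (fun r => (ruleKey r).2)

def grpFilter (s c : String) (l : List (List (String × String))) : List (List (String × String)) :=
  l.filter (fun r => ruleKey r == (s, c))

def innerSpec (s : String) (l : List (List (String × String))) : List (String × List (List (String × String))) :=
  (PySem.List.dedup (catList s l)).map (fun c => (c, grpFilter s c l))

def outSpec (l : List (List (String × String))) :
    List (String × PySem.Dict String (List (List (String × String)))) :=
  (PySem.List.dedup (sysList l)).map (fun s => (s, PySem.Dict.mk (innerSpec s l)))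

lemma A_as_foldl (rules : List (List (String × String))) :
    group_rules_by_system_category rules
      = (rules.foldl stepA PySem.Dict.empty).items.map (fun p => (p.1, p.2.items)) := rfl

lemma stepA_eq (g : PySem.Dict String (PySem.Dict String (List (List (String × String)))))
    (r : List (String × String)) :
    stepA g r =
      (let g' := if g.contains (ruleKey r).1 then g else g.insert (ruleKey r).1 PySem.Dict.empty
       let inner := g'.getD (ruleKey r).1 PySem.Dict.empty
       let inner2 := if inner.contains (ruleKey r).2 then inner else inner.insert (ruleKey r).2 []
       g'.insert (ruleKey r).1 (inner2.insert (ruleKey r).2 (inner2.getD (ruleKey r).2 [] ++ [r]))) := rfl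

lemma dedup_snoc (xs : List String) (x : String) :
    PySem.List.dedup (xs ++ [x])
      = if x ∈ xs then PySem.List.dedup xs else PySem.List.dedup xs ++ [x] := by
  rw [PySem.List.dedup_eq_ofList, PySem.List.dedup_eq_ofList, PySem.Set.ofList_eq_foldl,
    PySem.Set.ofList_eq_foldl, List.foldl_append]
  simp only [List.foldl_cons, List.foldl_nil, PySem.Set.add, PySem.Set.contains]
  rw [← PySem.Set.ofList_eq_foldl]
  by_cases h : x ∈ xs
  · simp [PySem.Set.mem_ofList, h]
  · simp [PySem.Set.mem_ofList, h]

lemma filter_sys_nil {s : String} {l : List (List (String × String))} (h : s ∉ sysList l) :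
    l.filter (fun r => (ruleKey r).1 == s) = [] := by
  rw [List.filter_eq_nil_iff]
  intro r hr hb
  exact h (List.mem_map.mpr ⟨r, hr, by simpa using hb⟩)

lemma grpFilter_nil_of_cat {s c : String} {l : List (List (String × String))} (h : c ∉ catList s l) :
    grpFilter s c l = [] := by
  rw [grpFilter, List.filter_eq_nil_iff]
  intro r hr hb
  have hk : ruleKey r = (s, c) := by simpa using hb
  apply h
  rw [catList]
  refine List.mem_map.mpr ⟨r, List.mem_filter.mpr ⟨hr, by simp [hk]⟩, by rw [hk]⟩

lemma sysList_snoc (l : List (List (String × String))) (r : List (String × String)) :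
    sysList (l ++ [r]) = sysList l ++ [(ruleKey r).1] := by simp [sysList]

lemma catList_snoc (s : String) (l : List (List (String × String))) (r : List (String × String)) :
    catList s (l ++ [r]) = catList s l ++ (if (ruleKey r).1 = s then [(ruleKey r).2] else []) := by
  by_cases h : (ruleKey r).1 = s <;> simp [catList, List.filter_append, h]

lemma grpFilter_snoc (s c : String) (l : List (List (String × String))) (r : List (String × String)) :
    grpFilter s c (l ++ [r]) = grpFilter s c l ++ (if ruleKey r = (s, c) then [r] else []) := by
  by_cases h : ruleKey r = (s, c) <;> simp [grpFilter, List.filter_append, h]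

lemma innerSpec_snoc_of_ne {s' : String} {l : List (List (String × String))}
    {r : List (String × String)} (h : (ruleKey r).1 ≠ s') :
    innerSpec s' (l ++ [r]) = innerSpec s' l := by
  have hcat : catList s' (l ++ [r]) = catList s' l := by simp [catList_snoc, h]
  rw [innerSpec, innerSpec, hcat]
  refine List.map_congr_left ?_
  intro c _
  have : ruleKey r ≠ (s', c) := fun he => h (by rw [he])
  simp [grpFilter_snoc, this]

lemma keys_mk_innerSpec (s : String) (l : List (List (String × String))) :
    (PySem.Dict.mk (innerSpec s l)).keys = PySem.List.dedup (catList s l) := by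
  show (innerSpec s l).map Prod.fst = _
  simp [innerSpec, Function.comp_def]

lemma keys_outSpec_items (l : List (List (String × String)))
    (G : PySem.Dict String (PySem.Dict String (List (List (String × String)))))
    (h : G.items = outSpec l) : G.keys = PySem.List.dedup (sysList l) := by
  show G.items.map Prod.fst = _
  simp [h, outSpec, Function.comp_def]

lemma insert_outSpec {l : List (List (String × String))} {r : List (String × String)}
    (G : PySem.Dict String (PySem.Dict String (List (List (String × String)))))
    (hG : G.items = outSpec l) (hsmem : (ruleKey r).1 ∈ sysList l)
    (X : PySem.Dict String (List (List (String × String))))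
    (hX : X.items = innerSpec (ruleKey r).1 (l ++ [r])) :
    (G.insert (ruleKey r).1 X).items = outSpec (l ++ [r]) := by
  have hkeys : G.keys = PySem.List.dedup (sysList l) := keys_outSpec_items l G hG
  have hcs : G.contains (ruleKey r).1 = true := by
    rw [PySem.Dict.contains_eq_decide_mem_keys, hkeys]
    simp [hsmem]
  rw [PySem.Dict.items_insert_of_contains _ _ hcs, hG, outSpec, outSpec, sysList_snoc,
    dedup_snoc, if_pos hsmem, List.map_map]
  refine List.map_congr_left ?_
  intro s' hs'
  by_cases hss : s' = (ruleKey r).1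
  · subst hss
    simp only [Function.comp_def, beq_self_eq_true, if_true]
    exact Prod.ext rfl (PySem.Dict.ext hX)
  · have hb : (s' == (ruleKey r).1) = false := by simp [hss]
    simp only [Function.comp_def, hb, Bool.false_eq_true, if_false]
    rw [innerSpec_snoc_of_ne (fun he => hss he.symm)]

lemma innerSpec_snoc_mem {s c : String} {l : List (List (String × String))}
    {r : List (String × String)} (hkey : ruleKey r = (s, c)) (hcmem : c ∈ catList s l) :
    innerSpec s (l ++ [r])
      = (innerSpec s l).map
          (fun p => if p.1 == c then (c, grpFilter s c l ++ [r]) else p) := by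
  rw [innerSpec, catList_snoc, hkey, if_pos rfl, dedup_snoc, if_pos hcmem, innerSpec,
    List.map_map]
  refine List.map_congr_left ?_
  intro c' hc'
  simp only [Function.comp_def]
  by_cases hcc' : c' = c
  · subst hcc'
    simp only [beq_self_eq_true, if_true]
    rw [grpFilter_snoc, if_pos hkey]
  · have hb : (c' == c) = false := by simp [hcc']
    have hk' : ruleKey r ≠ (s, c') := by
      rw [hkey]; exact fun he => hcc' (by injection he with _ h2; exact h2.symm)
    simp only [hb, Bool.false_eq_true, if_false]
    rw [grpFilter_snoc, if_neg hk', List.append_nil]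

lemma innerSpec_snoc_new {s c : String} {l : List (List (String × String))}
    {r : List (String × String)} (hkey : ruleKey r = (s, c)) (hcmem : c ∉ catList s l) :
    innerSpec s (l ++ [r]) = innerSpec s l ++ [(c, [r])] := by
  rw [innerSpec, catList_snoc, hkey, if_pos rfl, dedup_snoc, if_neg hcmem, List.map_append]
  congr 1
  · rw [innerSpec]
    refine List.map_congr_left ?_
    intro c' hc'
    have hcc' : c' ≠ c := fun he =>
      hcmem (by rw [← he]; exact (PySem.List.mem_dedup _ _).mp hc')
    have hk' : ruleKey r ≠ (s, c') := by
      rw [hkey]; exact fun he => hcc' (by injection he with _ h2; exact h2.symm)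
    rw [grpFilter_snoc, if_neg hk', List.append_nil]
  · show [(c, grpFilter s c (l ++ [r]))] = [(c, [r])]
    rw [grpFilter_snoc, if_pos hkey, grpFilter_nil_of_cat hcmem, List.nil_append]

-- the main loop invariant: the state of A's fold, itemised, is B's filter-based description
lemma foldl_items (l : List (List (String × String))) :
    (l.foldl stepA PySem.Dict.empty).items = outSpec l := by
  induction l using List.reverseRecOn with
  | nil => rfl
  | append_singleton l r ih =>
    rw [List.foldl_append, List.foldl_cons, List.foldl_nil, stepA_eq]
    set G := l.foldl stepA PySem.Dict.empty with hG
    have hkeys : G.keys = PySem.List.dedup (sysList l) := keys_outSpec_items l G ih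
    have hnodup : G.keys.Nodup := by rw [hkeys]; exact PySem.List.nodup_dedup _
    have hcontains : G.contains (ruleKey r).1 = decide ((ruleKey r).1 ∈ sysList l) := by
      rw [PySem.Dict.contains_eq_decide_mem_keys, hkeys]
      simp
    have hkey : ruleKey r = ((ruleKey r).1, (ruleKey r).2) := rfl
    by_cases hsmem : (ruleKey r).1 ∈ sysList l
    · -- system already present
      have hcs : G.contains (ruleKey r).1 = true := by rw [hcontains]; simp [hsmem]
      have hGin : ((ruleKey r).1, PySem.Dict.mk (innerSpec (ruleKey r).1 l)) ∈ G.items := by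
        rw [ih, outSpec]
        exact List.mem_map.mpr ⟨(ruleKey r).1, (PySem.List.mem_dedup _ _).mpr hsmem, rfl⟩
      have hget : G.getD (ruleKey r).1 PySem.Dict.empty
          = PySem.Dict.mk (innerSpec (ruleKey r).1 l) :=
        PySem.Dict.getD_of_mem_items G hGin hnodup _
      have hinnodup : (PySem.Dict.mk (innerSpec (ruleKey r).1 l)).keys.Nodup := by
        rw [keys_mk_innerSpec]; exact PySem.List.nodup_dedup _
      have hincontains : (PySem.Dict.mk (innerSpec (ruleKey r).1 l)).contains (ruleKey r).2
          = decide ((ruleKey r).2 ∈ catList (ruleKey r).1 l) := by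
        rw [PySem.Dict.contains_eq_decide_mem_keys, keys_mk_innerSpec]
        simp
      simp only [hcs, if_true, hget]
      by_cases hcmem : (ruleKey r).2 ∈ catList (ruleKey r).1 l
      · -- category already present
        have hcc : (PySem.Dict.mk (innerSpec (ruleKey r).1 l)).contains (ruleKey r).2 = true := by
          rw [hincontains]; simp [hcmem]
        have hmemc : ((ruleKey r).2, grpFilter (ruleKey r).1 (ruleKey r).2 l)
            ∈ innerSpec (ruleKey r).1 l := by
          rw [innerSpec]
          exact List.mem_map.mpr ⟨(ruleKey r).2, (PySem.List.mem_dedup _ _).mpr hcmem, rfl⟩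
        have hgetc : (PySem.Dict.mk (innerSpec (ruleKey r).1 l)).getD (ruleKey r).2 []
            = grpFilter (ruleKey r).1 (ruleKey r).2 l :=
          PySem.Dict.getD_of_mem_items _ hmemc hinnodup _
        simp only [hcc, if_true, hgetc]
        refine insert_outSpec G ih hsmem _ ?_
        rw [PySem.Dict.items_insert_of_contains _ _ hcc, innerSpec_snoc_mem hkey hcmem]
      · -- new category under an existing system
        have hcc : (PySem.Dict.mk (innerSpec (ruleKey r).1 l)).contains (ruleKey r).2 = false := by
          rw [hincontains]; simp [hcmem]
        simp only [hcc, Bool.false_eq_true, if_false, PySem.Dict.getD_insert_self,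
          PySem.Dict.insert_insert_self, List.nil_append]
        refine insert_outSpec G ih hsmem _ ?_
        rw [PySem.Dict.items_insert_of_not_contains _ _ hcc, innerSpec_snoc_new hkey hcmem]
    · -- new system
      have hcs : G.contains (ruleKey r).1 = false := by rw [hcontains]; simp [hsmem]
      have hcatnil : catList (ruleKey r).1 l = [] := by
        rw [catList, filter_sys_nil hsmem]; rfl
      have hcmem : (ruleKey r).2 ∉ catList (ruleKey r).1 l := by rw [hcatnil]; simp
      simp only [hcs, Bool.false_eq_true, if_false, PySem.Dict.getD_insert_self,
        PySem.Dict.contains_empty, PySem.Dict.insert_insert_self]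
      rw [PySem.Dict.items_insert_of_not_contains _ _ hcs, ih, outSpec, outSpec,
        sysList_snoc, dedup_snoc]
      simp only [hsmem, if_false, List.map_append, List.map_cons, List.map_nil]
      congr 1
      · refine List.map_congr_left ?_
        intro s' hs'
        have hne : (ruleKey r).1 ≠ s' := fun he =>
          hsmem ((PySem.List.mem_dedup _ _).mp (by rw [he]; exact hs'))
        rw [innerSpec_snoc_of_ne hne]
      · have hinner : innerSpec (ruleKey r).1 (l ++ [r]) = [((ruleKey r).2, [r])] := by
          rw [innerSpec_snoc_new hkey hcmem, innerSpec, hcatnil]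
          rfl
        refine congrArg (fun x => [x]) ?_
        refine congrArg _ ?_
        apply PySem.Dict.ext
        rw [hinner,
          PySem.Dict.items_insert_of_not_contains _ _ (PySem.Dict.contains_empty (ruleKey r).2)]
        rfl

-- B's port, rewritten into the same filter-based description
lemma B_as_outSpec (rules : List (List (String × String))) :
    group_rules_by_system_category_alt rules
      = (outSpec rules).map (fun p => (p.1, p.2.items)) := by
  rw [group_rules_by_system_category_alt, outSpec]
  simp only [List.map_map, List.filter_map]
  refine List.map_congr_left ?_
  intro s _
  show _ = (s, innerSpec s rules)
  refine congrArg _ ?_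
  rw [innerSpec, catList]
  simp only [Function.comp_def]
  simp [grpFilter]

-- ===== VERDICT (by name: the statement is the Claim_ definition above) =====
theorem group_rules_by_system_category_spec : Claim_equal_group_rules_by_system_category := by
  intro rules _
  show group_rules_by_system_category rules = group_rules_by_system_category_alt rules
  rw [A_as_foldl, foldl_items, B_as_outSpec]
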